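-- pv_equiv track=rewrite | github.com/Usama1029/RankingDocuments | 2.py | rank_documents_by_keyword
-- ===== SOURCE A (Python) =====
-- TITLES = {
--     "file1.txt": "Climate Change Overview",
--     "file2.txt": "Energy Conservation Strategies",
--     "file3.txt": "Data Science Introduction",
--     "file4.txt": "Blockchain Basics",
--     "file5.txt": "Artificial Intelligence Trends"
-- }
--
-- def tokenize(text):
--     # Simple tokenizer that splits text by spaces and removes non-alphabetic characters
--     tokens = [word.strip('.,!?()[]{}":;') for word in text.split() if word.isalpha()]
--     return tokens
--
-- def calculate_keyword_matching_score(query, document_tokens):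
--     query_words = query.lower().split()  # Tokenize the query
--     score = 0
--
--     for word in query_words:
--         word_count = document_tokens.count(word)  # Count occurrences of the word
--         score += word_count  # Add frequency to the score
--
--     return score
--
-- def rank_documents_by_keyword(query, documents):
--     ranked_documents = []
--     for filename, content in documents.items():
--         document_tokens = tokenize(content)
--         score = calculate_keyword_matching_score(query, document_tokens)
--         ranked_documents.append((filename, TITLES.get(filename, "Untitled Document"), score))
--
--     ranked_documents.sort(key=lambda x: x[2], reverse=True)  # Sort by score in descending order
--     return ranked_documents
-- ===== SOURCE B (Python) =====
-- TITLES = {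
--     "file1.txt": "Climate Change Overview",
--     "file2.txt": "Energy Conservation Strategies",
--     "file3.txt": "Data Science Introduction",
--     "file4.txt": "Blockchain Basics",
--     "file5.txt": "Artificial Intelligence Trends"
-- }
--
-- def tokenize(text):
--     tokens = [word.strip('.,!?()[]{}":;') for word in text.split() if word.isalpha()]
--     return tokens
--
-- def _insert_ranked(item, ranked):
--     # ranked is descending by score; binary-search the first position whose
--     # score is strictly below item's (so ties keep original document order)
--     lo, hi = 0, len(ranked)
--     while lo < hi:
--         mid = (lo + hi) // 2
--         if ranked[mid][2] >= item[2]: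
--             lo = mid + 1
--         else:
--             hi = mid
--     ranked.insert(lo, item)
--
-- def rank_documents_by_keyword(query, documents):
--     # multiplicity table of the query words, built once
--     qcount = {}
--     for w in query.lower().split():
--         qcount[w] = qcount.get(w, 0) + 1
--     # score each document in one pass over its tokens and insert it directly
--     # at its sorted position: no separate sort pass at the end
--     ranked = []
--     for fn, content in documents.items():
--         score = sum(qcount.get(t, 0) for t in tokenize(content))
--         _insert_ranked((fn, TITLES.get(fn, "Untitled Document"), score), ranked)
--     return ranked
-- ===== Notes on version B (the rewrite author's own statement) =====
-- stated objective: faster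
-- what changed: B builds a multiplicity dict of the query words once and scores each document in a single pass over its tokens (instead of rescanning the whole token list once per query word), and replaces the build-then-sort with an online binary-search insertion of each scored document into a descending, tie-stable accumulator, so there is no final sort pass.
import Mathlib
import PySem

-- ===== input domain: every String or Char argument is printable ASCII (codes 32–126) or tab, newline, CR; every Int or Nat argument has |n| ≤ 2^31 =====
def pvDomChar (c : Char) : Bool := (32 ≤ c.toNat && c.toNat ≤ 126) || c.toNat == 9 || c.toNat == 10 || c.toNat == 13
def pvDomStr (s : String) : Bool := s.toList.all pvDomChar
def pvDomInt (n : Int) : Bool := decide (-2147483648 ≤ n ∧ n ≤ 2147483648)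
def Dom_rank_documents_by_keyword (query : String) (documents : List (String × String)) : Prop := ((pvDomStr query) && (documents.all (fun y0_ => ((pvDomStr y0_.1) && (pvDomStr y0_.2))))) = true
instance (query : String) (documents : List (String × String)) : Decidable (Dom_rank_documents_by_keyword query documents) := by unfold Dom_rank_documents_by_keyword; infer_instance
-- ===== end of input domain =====

-- B scores each document in one pass via a query-word multiplicity dict (instead of
-- rescanning the token list per query word) and binary-search-inserts each scored
-- document at its sorted position in a descending accumulator (no final sort pass) —
-- objective: faster (measured).

-- ===== PORT A =====
def pvTITLES : PySem.Dict String String := PySem.Dict.ofList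
  [("file1.txt", "Climate Change Overview"),
   ("file2.txt", "Energy Conservation Strategies"),
   ("file3.txt", "Data Science Introduction"),
   ("file4.txt", "Blockchain Basics"),
   ("file5.txt", "Artificial Intelligence Trends")]

def pvTokenize (text : String) : List String :=
  ((PySem.Str.split₀ text).filter (fun w => PySem.Str.strIsalpha w)).map
    (fun w => PySem.Str.stripChars w ".,!?()[]{}\":;")

def pvScoreA (query : String) (document_tokens : List String) : Int :=
  (PySem.Str.split₀ (PySem.Str.lower query)).foldl
    (fun score word => score + PySem.List.count document_tokens word) 0

def rank_documents_by_keyword (query : String) (documents : List (String × String)) : List (String × String × Int) :=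
  let ranked := documents.foldl
    (fun acc fc =>
      acc ++ [(fc.1, pvTITLES.getD fc.1 "Untitled Document", pvScoreA query (pvTokenize fc.2))]) []
  PySem.List.sorted ranked (fun x => x.2.2) true

-- ===== PORT B =====
def pvQCount (query : String) : PySem.Dict String Int :=
  (PySem.Str.split₀ (PySem.Str.lower query)).foldl
    (fun d w => d.insert w (d.getD w 0 + 1)) PySem.Dict.empty

-- the while-loop of _insert_ranked: binary search for the first position whose
-- score is strictly below `score`; `ranked[mid]` is always in range
-- (lo ≤ mid < hi ≤ len ranked), so List.getD's default is never used
def pvFindPos (score : Int) (ranked : List (String × String × Int)) (lo hi : Nat) : Nat :=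
  if _h : lo < hi then
    let mid := (lo + hi) / 2
    if score ≤ (ranked.getD mid ("", "", 0)).2.2
    then pvFindPos score ranked (mid + 1) hi
    else pvFindPos score ranked lo mid
  else lo
termination_by hi - lo
decreasing_by all_goals omega

-- _insert_ranked: splice item in at the found position (ranked.insert(lo, item))
def pvInsertRanked (item : String × String × Int) (ranked : List (String × String × Int)) : List (String × String × Int) :=
  let lo := pvFindPos item.2.2 ranked 0 ranked.length
  ranked.take lo ++ item :: ranked.drop lo

def rank_documents_by_keyword_alt (query : String) (documents : List (String × String)) : List (String × String × Int) :=
  let qcount := pvQCount query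
  documents.foldl
    (fun ranked fc =>
      pvInsertRanked
        (fc.1, pvTITLES.getD fc.1 "Untitled Document",
         ((pvTokenize fc.2).map (fun t => qcount.getD t 0)).sum)
        ranked) []

-- ===== PRECONDITION & SPEC =====
def Spec_rank_documents_by_keyword (query : String) (documents : List (String × String)) (out : List (String × String × Int)) : Prop := out = rank_documents_by_keyword_alt query documents
instance (query : String) (documents : List (String × String)) (out : List (String × String × Int)) : Decidable (Spec_rank_documents_by_keyword query documents out) := by unfold Spec_rank_documents_by_keyword; infer_instance

-- ===== CLAIM =====
def Claim_equal_rank_documents_by_keyword : Prop := ∀ (query : String) (documents : List (String × String)), Dom_rank_documents_by_keyword query documents → Spec_rank_documents_by_keyword query documents (rank_documents_by_keyword query documents)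

-- ===== LEMMAS AND PROOFS =====

-- the query-word counting loop computes the multiplicity of each word
lemma pv_getD_qfold (ws : List String) (d : PySem.Dict String Int) (t : String) :
    (ws.foldl (fun d w => d.insert w (d.getD w 0 + 1)) d).getD t 0
      = d.getD t 0 + (ws.count t : Int) := by
  induction ws generalizing d with
  | nil => simp
  | cons w ws ih =>
    simp only [List.foldl_cons, ih, List.count_cons]
    by_cases h : w = t
    · subst h; simp; ring
    · simp [PySem.Dict.getD_insert, h, Ne.symm h, beq_iff_eq]

-- double counting: summing count(tokens, w) over query words equals
-- summing the query multiplicity of t over tokens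
lemma pv_sum_indicator (q : String) (ts : List String) :
    (ts.map (fun i => if q = i then (1 : Int) else 0)).sum = (ts.count q : Int) := by
  induction ts with
  | nil => simp
  | cons t ts ih =>
    simp only [List.map_cons, List.sum_cons, List.count_cons]
    by_cases h : q = t
    · subst h; simp [ih]; ring
    · simp [h, Ne.symm h, ih]

lemma pv_count_cons_sum (q : String) (qs ts : List String) :
    (ts.map (fun t => (((q :: qs).count t : Nat) : Int))).sum
      = (ts.count q : Int) + (ts.map (fun t => ((qs.count t : Nat) : Int))).sum := by
  induction ts with
  | nil => simp
  | cons t ts ih =>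
    simp only [List.map_cons, List.sum_cons, List.count_cons]
    by_cases h : q = t
    · subst h; simp [pv_sum_indicator]; ring
    · simp [h, Ne.symm h, pv_sum_indicator]; ring

lemma pv_double_count (qs ts : List String) :
    (qs.map (fun w => (ts.count w : Int))).sum
      = (ts.map (fun t => (qs.count t : Int))).sum := by
  induction qs with
  | nil => simp
  | cons q qs ih =>
    simp only [List.map_cons, List.sum_cons, ih, pv_count_cons_sum]

lemma pv_score_eq (query : String) (ts : List String) :
    pvScoreA query ts = ((ts.map (fun t => (pvQCount query).getD t 0)).sum) := by
  unfold pvScoreA pvQCount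
  rw [PySem.List.foldl_add (g := fun w => PySem.List.count ts w)]
  have : ∀ t, (((PySem.Str.split₀ (PySem.Str.lower query)).foldl
      (fun d w => d.insert w (d.getD w 0 + 1)) PySem.Dict.empty).getD t 0)
      = ((PySem.Str.split₀ (PySem.Str.lower query)).count t : Int) := by
    intro t; rw [pv_getD_qfold]; simp
  simp only [this, PySem.List.count_eq]
  rw [pv_double_count]
  simp

-- the descending-score order on result tuples
def pvDesc (a b : String × String × Int) : Prop := b.2.2 ≤ a.2.2

-- characterization of the takeWhile prefix length by its pointwise properties
lemma pv_takeWhile_length {α : Type} (p : α → Bool) (d : α) (xs : List α) (k : Nat)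
    (hk : k ≤ xs.length)
    (h1 : ∀ j, j < k → p (xs.getD j d) = true)
    (h2 : k < xs.length → p (xs.getD k d) = false) :
    (xs.takeWhile p).length = k := by
  induction xs generalizing k with
  | nil => simpa using (hk.antisymm (Nat.zero_le k)).symm
  | cons x t ih =>
    cases k with
    | zero =>
      have hx : p x = false := by simpa using h2 (by simp)
      simp [hx]
    | succ k =>
      have hx : p x = true := by simpa using h1 0 (Nat.succ_pos k)
      simp only [List.takeWhile_cons, hx, if_true, List.length_cons]
      have := ih k (by simpa using hk)
        (fun j hj => by simpa using h1 (j + 1) (by omega))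
        (fun h => by simpa using h2 (by simpa using Nat.succ_lt_succ h))
      omega

-- the binary search finds the length of the ≥-score prefix of a descending list
lemma pv_findPos_spec (score : Int) (ranked : List (String × String × Int))
    (hs : List.Pairwise pvDesc ranked) :
    ∀ (n lo hi : Nat), hi - lo ≤ n → lo ≤ hi → hi ≤ ranked.length →
      (∀ j, j < lo → score ≤ (ranked.getD j ("", "", 0)).2.2) →
      (∀ j, hi ≤ j → j < ranked.length → (ranked.getD j ("", "", 0)).2.2 < score) →
      pvFindPos score ranked lo hi
        = (ranked.takeWhile (fun y => decide (score ≤ y.2.2))).length := by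
  have hmono : ∀ (i j : Nat), i ≤ j → j < ranked.length →
      (ranked.getD j ("", "", 0)).2.2 ≤ (ranked.getD i ("", "", 0)).2.2 := by
    intro i j hij hj
    rcases Nat.eq_or_lt_of_le hij with rfl | hlt
    · exact le_refl _
    · have hi : i < ranked.length := hij.trans_lt hj
      rw [List.getD_eq_getElem _ _ hj, List.getD_eq_getElem _ _ hi]
      exact (List.pairwise_iff_getElem.mp hs) i j hi hj hlt
  intro n
  induction n with
  | zero =>
    intro lo hi hn hlh hhl h1 h2
    have : lo = hi := by omega
    subst this
    rw [pvFindPos]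
    simp only [lt_irrefl]
    refine (pv_takeWhile_length _ ("", "", 0) ranked lo hhl
      (fun j hj => by simpa using h1 j hj)
      (fun h => by simpa using not_le.mpr (h2 lo (le_refl lo) h))).symm
  | succ n ih =>
    intro lo hi hn hlh hhl h1 h2
    rw [pvFindPos]
    by_cases hlt : lo < hi
    · simp only [hlt, dif_pos]
      set mid := (lo + hi) / 2 with hmid
      have hm1 : lo ≤ mid := by omega
      have hm2 : mid < hi := by omega
      have hmlen : mid < ranked.length := lt_of_lt_of_le hm2 hhl
      by_cases hc : score ≤ (ranked.getD mid ("", "", 0)).2.2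
      · simp only [hc, if_pos]
        exact ih (mid + 1) hi (by omega) (by omega) hhl
          (fun j hj => by
            by_cases hjlo : j < lo
            · exact h1 j hjlo
            · exact le_trans hc (hmono j mid (by omega) hmlen))
          h2
      · simp only [hc, if_neg, not_false_iff]
        exact ih lo mid (by omega) (by omega) (le_of_lt hmlen)
          h1
          (fun j hj hjl => lt_of_le_of_lt (hmono mid j hj hjl) (not_le.mp hc))
    · simp only [hlt, dif_neg, not_false_iff]
      have : lo = hi := by omega
      subst this
      refine (pv_takeWhile_length _ ("", "", 0) ranked lo hhl
        (fun j hj => by simpa using h1 j hj)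
        (fun h => by simpa using not_le.mpr (h2 lo (le_refl lo) h))).symm

-- linear stable insertion, as an abstract description of where item lands
def pvLinInsert (item : String × String × Int) : List (String × String × Int) → List (String × String × Int)
  | [] => [item]
  | y :: ys => if item.2.2 ≤ y.2.2 then y :: pvLinInsert item ys else item :: y :: ys

lemma pv_linInsert_eq_takeWhile (item : String × String × Int) (ys : List (String × String × Int)) :
    pvLinInsert item ys
      = ys.takeWhile (fun y => decide (item.2.2 ≤ y.2.2))
        ++ item :: ys.dropWhile (fun y => decide (item.2.2 ≤ y.2.2)) := by
  induction ys with
  | nil => simp [pvLinInsert]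
  | cons y ys ih =>
    by_cases h : item.2.2 ≤ y.2.2
    · simp [pvLinInsert, h, ih]
    · simp [pvLinInsert, h]

lemma pv_take_takeWhile {α : Type} (p : α → Bool) (ys : List α) :
    ys.take (ys.takeWhile p).length = ys.takeWhile p := by
  induction ys with
  | nil => rfl
  | cons y ys ih =>
    by_cases h : p y
    · simp [h, ih]
    · simp [h]

lemma pv_drop_takeWhile {α : Type} (p : α → Bool) (ys : List α) :
    ys.drop (ys.takeWhile p).length = ys.dropWhile p := by
  induction ys with
  | nil => rfl
  | cons y ys ih =>
    by_cases h : p y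
    · simp [h, ih]
    · simp [h]

-- on a descending list, binary-search insertion is linear stable insertion
lemma pv_insertRanked_eq_lin (item : String × String × Int) (ys : List (String × String × Int))
    (hs : List.Pairwise pvDesc ys) :
    pvInsertRanked item ys = pvLinInsert item ys := by
  unfold pvInsertRanked
  rw [pv_findPos_spec item.2.2 ys hs ys.length 0 ys.length (by omega) (Nat.zero_le _)
      (le_refl _) (fun j hj => absurd hj (Nat.not_lt_zero j)) (fun j hj hjl => absurd hjl (by omega))]
  rw [pv_linInsert_eq_takeWhile]
  show ys.take (ys.takeWhile (fun y => decide (item.2.2 ≤ y.2.2))).length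
      ++ item :: ys.drop (ys.takeWhile (fun y => decide (item.2.2 ≤ y.2.2))).length = _
  rw [pv_take_takeWhile, pv_drop_takeWhile]

-- pvLinInsert is PySem's insertBy for the descending key order
lemma pv_linInsert_eq_insertBy (item : String × String × Int) (ys : List (String × String × Int)) :
    pvLinInsert item ys
      = PySem.List.insertBy (fun a b => decide ((fun x : String × String × Int => x.2.2) b < (fun x : String × String × Int => x.2.2) a)) item ys := by
  induction ys with
  | nil => simp [pvLinInsert, PySem.List.insertBy]
  | cons y ys ih =>
    simp only [pvLinInsert, PySem.List.insertBy, ih]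
    by_cases h : item.2.2 ≤ y.2.2
    · simp [h, not_lt.mpr h]
    · simp [h, lt_of_not_ge h]

-- linear stable insertion keeps the list descending
lemma pv_linInsert_pairwise (item : String × String × Int) (ys : List (String × String × Int))
    (hs : List.Pairwise pvDesc ys) :
    List.Pairwise pvDesc (pvLinInsert item ys) := by
  induction ys with
  | nil => simp [pvLinInsert, pvDesc]
  | cons y ys ih =>
    rcases List.pairwise_cons.mp hs with ⟨hy, hys⟩
    by_cases h : item.2.2 ≤ y.2.2
    · simp only [pvLinInsert, h, if_pos]
      refine List.pairwise_cons.mpr ⟨?_, ih hys⟩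
      intro z hz
      rcases (by
        have := pv_linInsert_eq_takeWhile item ys
        rw [this] at hz
        simp only [List.mem_append, List.mem_cons] at hz
        rcases hz with hz | hz | hz
        · exact Or.inr ((List.takeWhile_sublist _).subset hz)
        · exact Or.inl hz
        · exact Or.inr ((List.dropWhile_sublist _).subset hz) : z = item ∨ z ∈ ys) with rfl | hz
      · exact h
      · exact hy z hz
    · simp only [pvLinInsert, h, if_neg, not_false_iff]
      refine List.pairwise_cons.mpr ⟨?_, hs⟩
      intro z hz
      rcases List.mem_cons.mp hz with rfl | hz
      · exact le_of_lt (lt_of_not_ge h)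
      · exact le_trans (hy z hz) (le_of_lt (lt_of_not_ge h))

-- folding binary-search insertion over any list equals folding insertBy,
-- starting from any descending accumulator
lemma pv_fold_insert_eq (items : List (String × String × Int))
    (acc : List (String × String × Int)) (hs : List.Pairwise pvDesc acc) :
    items.foldl (fun r it => pvInsertRanked it r) acc
      = items.foldl (fun r it =>
          PySem.List.insertBy (fun a b => decide ((fun x : String × String × Int => x.2.2) b < (fun x : String × String × Int => x.2.2) a)) it r) acc := by
  induction items generalizing acc with
  | nil => rfl
  | cons it items ih =>
    simp only [List.foldl_cons]
    rw [pv_insertRanked_eq_lin it acc hs, pv_linInsert_eq_insertBy]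
    exact ih _ (by rw [← pv_linInsert_eq_insertBy]; exact pv_linInsert_pairwise it acc hs)

-- B's foldl, expressed over the mapped tuples
def pvTupleB (query : String) (fc : String × String) : String × String × Int :=
  (fc.1, pvTITLES.getD fc.1 "Untitled Document",
   ((pvTokenize fc.2).map (fun t => (pvQCount query).getD t 0)).sum)

lemma pv_alt_foldl (query : String) (documents : List (String × String)) :
    rank_documents_by_keyword_alt query documents
      = (documents.map (pvTupleB query)).foldl (fun r it => pvInsertRanked it r) [] := by
  unfold rank_documents_by_keyword_alt pvTupleB
  rw [List.foldl_map]

-- ===== VERDICT =====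
theorem rank_documents_by_keyword_spec : Claim_equal_rank_documents_by_keyword := by
  intro query documents _
  unfold Spec_rank_documents_by_keyword
  rw [pv_alt_foldl, pv_fold_insert_eq _ _ List.Pairwise.nil]
  unfold rank_documents_by_keyword
  simp only [PySem.List.foldl_append_singleton_eq_map, List.nil_append]
  rw [PySem.List.sorted_rev_eq_foldl_insertBy, List.foldl_map, List.foldl_map]
  simp only [pvTupleB, pv_score_eq]
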